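-- pv_equiv track=rewrite | github.com/gereleth/aoc_python | src/year2025/day06.py | part2
-- ===== SOURCE A (Python) =====
-- def part2(text_input: str) -> int:
--     lines = text_input.split("\n")
--     R, C = len(lines), len(lines[0])
--     total = 0
--     numbers = []
--     for c in range(C - 1, -1, -1):
--         number = "".join(lines[r][c] for r in range(R - 1)).strip()
--         if number:
--             numbers.append(int(number))
--         sign = lines[R - 1][c]
--         if sign == "+":
--             total += sum(numbers)
--             numbers.clear()
--         elif sign == "*":
--             product = 1
--             for n in numbers:
--                 product *= n
--             total += product
--             numbers.clear()
--     return total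
-- ===== SOURCE B (Python) =====
-- def part2(text_input: str) -> int:
--     lines = text_input.split("\n")
--     R, C = len(lines), len(lines[0])
--     # pass 1: tokenize every column LEFT-to-right: (parsed number or None, operator-row char)
--     tokens = []
--     for c in range(C):
--         s = "".join(lines[r][c] for r in range(R - 1)).strip()
--         tokens.append((int(s) if s else None, lines[R - 1][c]))
--     # pass 2: skip leading columns no operator ever consumes, then repeatedly
--     # consume one operator-led segment: the operator's own column plus every
--     # following column up to (not including) the next operator.
--     i = 0
--     while i < len(tokens) and tokens[i][1] not in "+*":
--         i += 1
--     total = 0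
--     while i < len(tokens):
--         n0, op = tokens[i]
--         i += 1
--         group = [] if n0 is None else [n0]
--         while i < len(tokens) and tokens[i][1] not in "+*":
--             if tokens[i][0] is not None:
--                 group.append(tokens[i][0])
--             i += 1
--         if op == "+":
--             total += sum(group)
--         else:
--             p = 1
--             for n in group:
--                 p *= n
--             total += p
--     return total
-- ===== Notes on version B (the rewrite author's own statement) =====
-- stated objective: alternative
-- what changed: B tokenizes columns left-to-right and then consumes the token list one operator-led segment at a time (drop leading unclaimed columns; each operator takes its own column plus all following number columns up to the next operator), instead of A's right-to-left column scan that accumulates a pending-numbers list and clears it each time an operator fires; ragged grids or unparsable column strings, on which A raises IndexError/ValueError, are excluded by Pre_.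
import Mathlib
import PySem

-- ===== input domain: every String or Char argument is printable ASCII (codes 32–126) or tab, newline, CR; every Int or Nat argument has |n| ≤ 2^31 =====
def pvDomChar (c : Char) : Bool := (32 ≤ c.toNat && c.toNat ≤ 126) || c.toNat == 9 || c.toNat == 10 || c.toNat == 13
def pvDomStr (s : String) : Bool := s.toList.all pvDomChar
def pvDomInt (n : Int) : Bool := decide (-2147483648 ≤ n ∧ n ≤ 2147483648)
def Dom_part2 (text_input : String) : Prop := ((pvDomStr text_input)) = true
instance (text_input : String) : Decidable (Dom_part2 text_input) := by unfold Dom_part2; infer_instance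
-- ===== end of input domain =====

-- B: tokenize the columns left-to-right, drop leading unclaimed columns, then consume the
-- token list one operator-led segment at a time (operator's column + following numbers up
-- to the next operator), instead of A's right-to-left scan with a pending-numbers
-- accumulator cleared on each operator (objective: alternative).


-- ===== PORT A =====
def part2 (text_input : String) : Int :=
  let lines := PySem.Chars.splitOn text_input.toList ['\n']
  let R : Int := lines.length
  let C : Int := (PySem.List.pyGetD lines 0 []).length
  let res := (PySem.List.pyRange (C - 1) (-1) (-1)).foldl
    (fun (st : Int × List Int) c =>
      let number := PySem.Chars.strip
        ((PySem.List.pyRange 0 (R - 1) 1).map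
          (fun r => PySem.List.pyGetD (PySem.List.pyGetD lines r []) c ' '))
      let numbers := if number ≠ [] then st.2 ++ [(PySem.Int.ofChars? number).getD 0] else st.2
      let sign := PySem.List.pyGetD (PySem.List.pyGetD lines (R - 1) []) c ' '
      if sign = '+' then (st.1 + numbers.sum, ([] : List Int))
      else if sign = '*' then (st.1 + numbers.foldl (· * ·) 1, ([] : List Int))
      else (st.1, numbers))
    ((0 : Int), ([] : List Int))
  res.1

-- ===== PORT B =====
-- token not in "+*"  (the while-loop guards of Source B)
def pvNonOp (t : Option Int × Char) : Bool := !(t.2 == '+' || t.2 == '*')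

-- the two nested while loops of Source B: consume one operator-led segment per outer iteration
def pvSegLoop (total : Int) (ts : List (Option Int × Char)) : Int :=
  match ts with
  | [] => total
  | (n0, op) :: rest =>
    let group := (match n0 with | none => [] | some n => [n]) ++
      (rest.takeWhile pvNonOp).filterMap Prod.fst
    pvSegLoop (total + (if op = '+' then group.sum else group.foldl (· * ·) 1))
      (rest.dropWhile pvNonOp)
termination_by ts.length
decreasing_by
  have := List.length_dropWhile_le pvNonOp rest
  simp; omega

def part2_alt (text_input : String) : Int :=
  let lines := PySem.Chars.splitOn text_input.toList ['\n']
  let R : Int := lines.length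
  let C : Int := (PySem.List.pyGetD lines 0 []).length
  let tokens := (PySem.List.pyRange 0 C 1).map (fun c =>
    let s := PySem.Chars.strip
      ((PySem.List.pyRange 0 (R - 1) 1).map
        (fun r => PySem.List.pyGetD (PySem.List.pyGetD lines r []) c ' '))
    ((if s = [] then none else some ((PySem.Int.ofChars? s).getD 0)),
     PySem.List.pyGetD (PySem.List.pyGetD lines (R - 1) []) c ' '))
  pvSegLoop 0 (tokens.dropWhile pvNonOp)

-- ===== PRECONDITION & SPEC =====
-- Pre_ admits exactly the inputs on which Python A returns: every line at least as long as the
-- first line (else lines[r][c] raises IndexError) and every stripped column string empty or a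
-- valid int literal (else int(number) raises ValueError).
def Pre_part2 (text_input : String) : Prop :=
  let lines := PySem.Chars.splitOn text_input.toList ['\n']
  let C := (lines.headD []).length
  (∀ l ∈ lines, C ≤ l.length) ∧
  (∀ c ∈ List.range C,
    PySem.Chars.strip (lines.dropLast.map (fun l => l.getD c ' ')) = [] ∨
    (PySem.Int.ofChars? (PySem.Chars.strip (lines.dropLast.map (fun l => l.getD c ' ')))).isSome)
instance (text_input : String) : Decidable (Pre_part2 text_input) := by unfold Pre_part2; infer_instance

def pvWitness_part2 : String := "123\n+*+"

def Spec_part2 (text_input : String) (out : Int) : Prop := out = part2_alt text_input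
instance (text_input : String) (out : Int) : Decidable (Spec_part2 text_input out) := by unfold Spec_part2; infer_instance

-- ===== CLAIM (what is proved, stated in full; the proofs are below) =====
def Claim_equal_part2 : Prop := ∀ (text_input : String), Dom_part2 text_input → Pre_part2 text_input → Spec_part2 text_input (part2 text_input)

-- ===== LEMMAS AND PROOFS =====

-- the loop body of A's port, named (definitionally the port's lambda)
def pvStepA (lines : List (List Char)) (st : Int × List Int) (c : Int) : Int × List Int :=
  let R : Int := lines.length
  let number := PySem.Chars.strip
    ((PySem.List.pyRange 0 (R - 1) 1).map
      (fun r => PySem.List.pyGetD (PySem.List.pyGetD lines r []) c ' '))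
  let numbers := if number ≠ [] then st.2 ++ [(PySem.Int.ofChars? number).getD 0] else st.2
  let sign := PySem.List.pyGetD (PySem.List.pyGetD lines (R - 1) []) c ' '
  if sign = '+' then (st.1 + numbers.sum, ([] : List Int))
  else if sign = '*' then (st.1 + numbers.foldl (· * ·) 1, ([] : List Int))
  else (st.1, numbers)

-- the column-c token of B's port, named
def pvTokenAt (lines : List (List Char)) (c : Int) : Option Int × Char :=
  let s := PySem.Chars.strip
    ((PySem.List.pyRange 0 ((lines.length : Int) - 1) 1).map
      (fun r => PySem.List.pyGetD (PySem.List.pyGetD lines r []) c ' '))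
  ((if s = [] then none else some ((PySem.Int.ofChars? s).getD 0)),
   PySem.List.pyGetD (PySem.List.pyGetD lines ((lines.length : Int) - 1) []) c ' ')

-- A's step, expressed on a token
def pvStepTok (st : Int × List Int) (tok : Option Int × Char) : Int × List Int :=
  let numbers := match tok.1 with
    | some n => st.2 ++ [n]
    | none => st.2
  if tok.2 = '+' then (st.1 + numbers.sum, ([] : List Int))
  else if tok.2 = '*' then (st.1 + numbers.foldl (· * ·) 1, ([] : List Int))
  else (st.1, numbers)

theorem stepA_eq_tok (lines : List (List Char)) (st : Int × List Int) (c : Int) :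
    pvStepA lines st c = pvStepTok st (pvTokenAt lines c) := by
  unfold pvStepA pvTokenAt pvStepTok
  by_cases h : PySem.Chars.strip
      ((PySem.List.pyRange 0 ((lines.length : Int) - 1) 1).map
        (fun r => PySem.List.pyGetD (PySem.List.pyGetD lines r []) c ' ')) = [] <;>
    simp [h]

theorem segLoop_add_n (n : Nat) :
    ∀ (ts : List (Option Int × Char)), ts.length ≤ n →
      ∀ (total : Int), pvSegLoop total ts = total + pvSegLoop 0 ts := by
  induction n with
  | zero =>
    intro ts h total
    rw [List.length_eq_zero_iff.mp (Nat.le_zero.mp h)]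
    simp [pvSegLoop]
  | succ n ih =>
    intro ts h total
    match ts with
    | [] => simp [pvSegLoop]
    | (n0, op) :: rest =>
      rw [pvSegLoop.eq_def, show pvSegLoop 0 ((n0, op) :: rest) = _ from pvSegLoop.eq_def ..]
      simp only []
      have hlen : (rest.dropWhile pvNonOp).length ≤ n := by
        have := List.length_dropWhile_le pvNonOp rest
        simp at h; omega
      rw [ih _ hlen, ih _ hlen (0 + _)]
      ring

theorem segLoop_add (total : Int) (ts : List (Option Int × Char)) :
    pvSegLoop total ts = total + pvSegLoop 0 ts :=
  segLoop_add_n ts.length ts le_rfl total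

-- foldl of A's step over the reversed token list, fully characterized
theorem foldl_mul_int (l : List Int) (a : Int) : l.foldl (· * ·) a = a * l.prod := by
  induction l generalizing a with
  | nil => simp
  | cons x xs ih => simp [List.foldl_cons, ih, List.prod_cons]; ring

theorem foldr_mul_int (l : List Int) : l.foldr (fun x y => y * x) 1 = l.prod := by
  induction l with
  | nil => simp
  | cons x xs ih => simp [List.foldr_cons, ih, List.prod_cons]; ring

theorem foldA_char (ts : List (Option Int × Char)) :
    ts.reverse.foldl pvStepTok ((0 : Int), ([] : List Int)) =
      (pvSegLoop 0 (ts.dropWhile pvNonOp),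
       ((ts.takeWhile pvNonOp).filterMap Prod.fst).reverse) := by
  induction ts with
  | nil => simp [pvSegLoop]
  | cons t0 rest ih =>
    obtain ⟨n0, c0⟩ := t0
    rw [List.reverse_cons, List.foldl_append, List.foldl_cons, List.foldl_nil, ih]
    by_cases h : pvNonOp (n0, c0) = true
    · have h1 : ¬ c0 = '+' := by simp [pvNonOp] at h; exact h.1
      have h2 : ¬ c0 = '*' := by simp [pvNonOp] at h; exact h.2
      rw [List.dropWhile_cons_of_pos h, List.takeWhile_cons_of_pos h]
      cases n0 <;> simp [pvStepTok, h1, h2]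
    · have hR : pvSegLoop 0 ((n0, c0) :: rest) =
          (if c0 = '+' then
            ((match n0 with | none => ([] : List Int) | some n => [n]) ++
              (rest.takeWhile pvNonOp).filterMap Prod.fst).sum
          else
            ((match n0 with | none => ([] : List Int) | some n => [n]) ++
              (rest.takeWhile pvNonOp).filterMap Prod.fst).foldl (· * ·) 1) +
          pvSegLoop 0 (rest.dropWhile pvNonOp) := by
        conv_lhs => rw [pvSegLoop.eq_def]
        simp only []
        rw [segLoop_add]
        cases n0 <;> simp only [] <;> ring
      rw [List.dropWhile_cons_of_neg h, List.takeWhile_cons_of_neg h, hR]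
      have hop : c0 = '+' ∨ c0 = '*' := by
        simp [pvNonOp] at h; tauto
      have hne : ¬ (('*' : Char) = '+') := by decide
      rcases hop with hp | hs
      · subst hp
        cases n0 <;>
          simp [pvStepTok, List.sum_append, List.sum_reverse] <;> ring
      · subst hs
        cases n0 <;>
          simp [pvStepTok, hne, foldl_mul_int, foldr_mul_int] <;> ring

theorem main_lines (lines : List (List Char)) :
    ((PySem.List.pyRange (((PySem.List.pyGetD lines 0 ([] : List Char)).length : Int) - 1)
        (-1) (-1)).foldl (pvStepA lines) ((0 : Int), ([] : List Int))).1 =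
      pvSegLoop 0
        (((PySem.List.pyRange 0 ((PySem.List.pyGetD lines 0 ([] : List Char)).length : Int) 1).map
            (pvTokenAt lines)).dropWhile pvNonOp) := by
  have hstep : pvStepA lines = fun st c => pvStepTok st (pvTokenAt lines c) := by
    funext st c; exact stepA_eq_tok lines st c
  rw [PySem.List.pyRange_neg_one_eq_reverse,
      show (-1 : Int) + 1 = 0 from by ring,
      show ((PySem.List.pyGetD lines 0 ([] : List Char)).length : Int) - 1 + 1 =
        ((PySem.List.pyGetD lines 0 ([] : List Char)).length : Int) from by ring,
      hstep, ← List.foldl_map, List.map_reverse, foldA_char]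

theorem part2_eq_alt (t : String) : part2 t = part2_alt t :=
  main_lines (PySem.Chars.splitOn t.toList ['\n'])

-- ===== VERDICT (by name: the statement is the Claim_ definition above) =====
theorem part2_spec : Claim_equal_part2 := by
  intro t _ _
  exact part2_eq_alt t
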